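-- pv_equiv track=rewrite | github.com/ujiuji1259/shinra-pipeline | src/entity_linking/evaluate_bert_ranker.py | parse_input_tokens_without_context
-- ===== SOURCE A (Python) =====
-- def parse_input_tokens_without_context(tokens):
--     mention = ""
--     overall_text = ""
--     title = ""
--     idx = 0
--
--     while idx < len(tokens) and tokens[idx] != "[SEP]":
--         mention += tokens[idx][2:] if tokens[idx].startswith("##") else tokens[idx]
--         overall_text +=  tokens[idx][2:] if tokens[idx].startswith("##") else tokens[idx]
--         idx += 1
--
--     overall_text +=  tokens[idx][2:] if tokens[idx].startswith("##") else tokens[idx]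
--     idx += 1
--
--     while idx < len(tokens) and tokens[idx] != "[SEP]":
--         title += tokens[idx][2:] if tokens[idx].startswith("##") else tokens[idx]
--         overall_text +=  tokens[idx][2:] if tokens[idx].startswith("##") else tokens[idx]
--         idx += 1
--
--     while idx < len(tokens):
--         overall_text +=  tokens[idx][2:] if tokens[idx].startswith("##") else tokens[idx]
--         idx += 1
--
--     return mention, title, overall_text
-- ===== SOURCE B (Python) =====
-- def parse_input_tokens_without_context(tokens):
--     def strip(t):
--         return t[2:] if t.startswith("##") else t
--
--     sep1 = tokens.index("[SEP]")
--     rest = tokens[sep1 + 1:]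
--     sep2 = rest.index("[SEP]") if "[SEP]" in rest else len(rest)
--     mention = "".join(map(strip, tokens[:sep1]))
--     title = "".join(map(strip, rest[:sep2]))
--     overall_text = "".join(map(strip, tokens))
--     return mention, title, overall_text
-- ===== Notes on version B (the rewrite author's own statement) =====
-- stated objective: simpler
-- what changed: Replaces the single index-cursor with three hand-rolled while-loops and repeated in-place string concatenation by locating the two '[SEP]' positions with list.index and building each of the three outputs in one shot from slices with ''.join(map(strip, ...)).
import Mathlib
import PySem

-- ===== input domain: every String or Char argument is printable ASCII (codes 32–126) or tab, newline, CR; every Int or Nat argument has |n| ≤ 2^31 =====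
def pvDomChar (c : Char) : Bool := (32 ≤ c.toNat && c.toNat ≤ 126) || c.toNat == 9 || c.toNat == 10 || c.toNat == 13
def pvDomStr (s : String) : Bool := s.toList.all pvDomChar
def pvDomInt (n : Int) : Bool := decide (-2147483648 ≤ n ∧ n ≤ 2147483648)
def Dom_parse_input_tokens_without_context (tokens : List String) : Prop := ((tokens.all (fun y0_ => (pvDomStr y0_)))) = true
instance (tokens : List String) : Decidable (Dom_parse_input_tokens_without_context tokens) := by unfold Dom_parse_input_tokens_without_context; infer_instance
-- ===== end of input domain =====

-- B builds the three strings from slices around the two '[SEP]' positions with join/map instead of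
-- A's three cursor-driven while-loops; same cost, plainer code. Equivalence on tokens containing '[SEP]'
-- (A raises IndexError otherwise).

-- ===== PORT A =====
-- first while: accumulate mention and overall_text until '[SEP]' (returns the unconsumed suffix)
def pvA_loop1 : List String → String → String → String × String × List String
  | [], m, o => (m, o, [])
  | t :: rest, m, o =>
    if t == "[SEP]" then (m, o, t :: rest)
    else pvA_loop1 rest (m ++ (if PySem.Str.startswith t "##" then PySem.Str.slice t (some 2) none else t)) (o ++ (if PySem.Str.startswith t "##" then PySem.Str.slice t (some 2) none else t))

-- second while: accumulate title and overall_text until the next '[SEP]'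
def pvA_loop2 : List String → String → String → String × String × List String
  | [], ti, o => (ti, o, [])
  | t :: rest, ti, o =>
    if t == "[SEP]" then (ti, o, t :: rest)
    else pvA_loop2 rest (ti ++ (if PySem.Str.startswith t "##" then PySem.Str.slice t (some 2) none else t)) (o ++ (if PySem.Str.startswith t "##" then PySem.Str.slice t (some 2) none else t))

-- third while: accumulate the remainder into overall_text
def pvA_loop3 : List String → String → String
  | [], o => o
  | t :: rest, o => pvA_loop3 rest (o ++ (if PySem.Str.startswith t "##" then PySem.Str.slice t (some 2) none else t))

def parse_input_tokens_without_context (tokens : List String) : String × String × String :=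
  match pvA_loop1 tokens "" "" with
  | (m, o, rest) =>
    match rest with
    | [] => ("", "", "")   -- Python raises IndexError here (tokens[idx] past the end); outside Pre_
    | sep :: rest1 =>
      let o := o ++ (if PySem.Str.startswith sep "##" then PySem.Str.slice sep (some 2) none else sep)
      match pvA_loop2 rest1 "" o with
      | (ti, o, rest2) => (m, ti, pvA_loop3 rest2 o)

-- ===== PORT B =====
def pvStripB (t : String) : String :=
  if PySem.Str.startswith t "##" then PySem.Str.slice t (some 2) none else t

def parse_input_tokens_without_context_alt (tokens : List String) : String × String × String :=
  match PySem.List.index? tokens "[SEP]" with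
  | none => ("", "", "")   -- Python: tokens.index raises ValueError here; outside Pre_
  | some sep1 =>
    let rest := PySem.List.slice tokens (some ((sep1 : Int) + 1)) none
    let sep2 : Nat :=
      if "[SEP]" ∈ rest then (PySem.List.index? rest "[SEP]").getD rest.length else rest.length
    let mention := PySem.Str.join "" ((PySem.List.slice tokens none (some (sep1 : Int))).map pvStripB)
    let title := PySem.Str.join "" ((PySem.List.slice rest none (some (sep2 : Int))).map pvStripB)
    let overall_text := PySem.Str.join "" (tokens.map pvStripB)
    (mention, title, overall_text)

-- ===== PRECONDITION & SPEC =====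
-- A raises IndexError when tokens contains no '[SEP]' (B raises ValueError there); excluded.
def Pre_parse_input_tokens_without_context (tokens : List String) : Prop := "[SEP]" ∈ tokens
instance (tokens : List String) : Decidable (Pre_parse_input_tokens_without_context tokens) := by
  unfold Pre_parse_input_tokens_without_context; infer_instance
def pvWitness_parse_input_tokens_without_context : List String := ["men", "##tion", "[SEP]", "ti", "##tle", "[SEP]", "ctx"]
def Spec_parse_input_tokens_without_context (tokens : List String) (out : String × String × String) : Prop := out = parse_input_tokens_without_context_alt tokens
instance (tokens : List String) (out : String × String × String) : Decidable (Spec_parse_input_tokens_without_context tokens out) := by unfold Spec_parse_input_tokens_without_context; infer_instance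

-- ===== CLAIM (what is proved, stated in full; the proofs are below) =====
def Claim_equal_parse_input_tokens_without_context : Prop := ∀ (tokens : List String), Dom_parse_input_tokens_without_context tokens → Pre_parse_input_tokens_without_context tokens → Spec_parse_input_tokens_without_context tokens (parse_input_tokens_without_context tokens)

-- ===== LEMMAS AND PROOFS =====

-- ''.join(map(strip, xs)), the building block of B
def pvJ (xs : List String) : String := PySem.Str.join "" (xs.map pvStripB)

theorem pvJ_nil : pvJ [] = "" := by
  apply String.toList_inj.mp
  simp [pvJ, PySem.Str.toList_join, PySem.Chars.join, List.intercalate]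

theorem pvJ_cons (x : String) (xs : List String) : pvJ (x :: xs) = pvStripB x ++ pvJ xs := by
  apply String.toList_inj.mp
  cases xs <;>
    simp [pvJ, PySem.Str.toList_join, PySem.Chars.join, List.intercalate]

theorem pvJ_append (xs ys : List String) : pvJ (xs ++ ys) = pvJ xs ++ pvJ ys := by
  induction xs with
  | nil => simp [pvJ_nil, String.empty_append]
  | cons a l ih => simp [pvJ_cons, ih, String.append_assoc]

-- the loop guard, as a predicate on tokens
def pvKeep (t : String) : Bool := !(t == "[SEP]")

theorem pvA_loop1_spec (xs : List String) (m o : String) :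
    pvA_loop1 xs m o = (m ++ pvJ (xs.takeWhile pvKeep), o ++ pvJ (xs.takeWhile pvKeep), xs.dropWhile pvKeep) := by
  induction xs generalizing m o with
  | nil => simp [pvA_loop1, pvJ_nil, String.append_empty]
  | cons t rest ih =>
    by_cases h : t == "[SEP]"
    · simp [pvA_loop1, h, pvKeep, pvJ_nil, String.append_empty]
    · simp only [pvA_loop1, h, if_neg, Bool.false_eq_true, not_false_eq_true, ih,
        List.takeWhile_cons, List.dropWhile_cons, pvKeep, Bool.not_eq_eq_eq_not, Bool.not_true,
        String.append_assoc]
      simp [pvJ_cons, pvStripB]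

theorem pvA_loop2_spec (xs : List String) (ti o : String) :
    pvA_loop2 xs ti o = (ti ++ pvJ (xs.takeWhile pvKeep), o ++ pvJ (xs.takeWhile pvKeep), xs.dropWhile pvKeep) := by
  induction xs generalizing ti o with
  | nil => simp [pvA_loop2, pvJ_nil, String.append_empty]
  | cons t rest ih =>
    by_cases h : t == "[SEP]"
    · simp [pvA_loop2, h, pvKeep, pvJ_nil, String.append_empty]
    · simp only [pvA_loop2, h, if_neg, Bool.false_eq_true, not_false_eq_true, ih,
        List.takeWhile_cons, List.dropWhile_cons, pvKeep, Bool.not_eq_eq_eq_not, Bool.not_true,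
        String.append_assoc]
      simp [pvJ_cons, pvStripB]

theorem pvA_loop3_spec (xs : List String) (o : String) : pvA_loop3 xs o = o ++ pvJ xs := by
  induction xs generalizing o with
  | nil => simp [pvA_loop3, pvJ_nil, String.append_empty]
  | cons t rest ih => simp [pvA_loop3, ih, pvJ_cons, pvStripB, String.append_assoc]

theorem pvIdx_eq (xs : List String) (h : "[SEP]" ∈ xs) :
    PySem.List.index? xs "[SEP]" = some (xs.takeWhile pvKeep).length := by
  induction xs with
  | nil => simp at h
  | cons a l ih =>
    by_cases hav : a = "[SEP]"
    · subst hav; simp [PySem.List.index?, List.idxOf?, List.findIdx?_cons, pvKeep]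
    · have hmem : "[SEP]" ∈ l := by simpa [hav, Ne.symm hav] using h
      simpa [PySem.List.index?, List.idxOf?_cons, hav, pvKeep] using ih hmem

theorem pvTake_takeWhile (p : String → Bool) (xs : List String) :
    xs.take (xs.takeWhile p).length = xs.takeWhile p :=
  (List.prefix_iff_eq_take.mp (List.takeWhile_prefix p)).symm

-- ===== VERDICT =====
theorem parse_input_tokens_without_context_spec : Claim_equal_parse_input_tokens_without_context := by
  intro tokens _ hpre
  unfold Spec_parse_input_tokens_without_context
  have hsplit := List.takeWhile_append_dropWhile (p := pvKeep) (l := tokens)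
  -- the dropWhile part starts with "[SEP]"
  have hdw : tokens.dropWhile pvKeep = "[SEP]" :: (tokens.dropWhile pvKeep).tail := by
    have hne : tokens.dropWhile pvKeep ≠ [] := by
      intro hnil
      have : "[SEP]" ∈ tokens.takeWhile pvKeep := by
        rw [← hsplit] at hpre; simpa [hnil] using hpre
      have := List.mem_takeWhile_imp this
      simp [pvKeep] at this
    have hhead := List.head_dropWhile_not pvKeep hne
    simp only [pvKeep, Bool.not_eq_eq_eq_not, Bool.not_false, beq_iff_eq] at hhead
    conv_lhs => rw [← List.cons_head_tail hne, hhead]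
  set tw := tokens.takeWhile pvKeep with htw
  set tl := (tokens.dropWhile pvKeep).tail with htl
  have htok : tokens = tw ++ "[SEP]" :: tl := by rw [← hsplit, hdw]
  -- A's side
  have hA : parse_input_tokens_without_context tokens =
      (pvJ tw, pvJ (tl.takeWhile pvKeep),
        pvJ tw ++ pvStripB "[SEP]" ++ pvJ (tl.takeWhile pvKeep) ++ pvJ (tl.dropWhile pvKeep)) := by
    unfold parse_input_tokens_without_context
    rw [pvA_loop1_spec]
    dsimp only
    rw [hdw]
    dsimp only
    rw [pvA_loop2_spec, pvA_loop3_spec]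
    simp [pvStripB, String.empty_append, String.append_assoc]
    rw [htw]
  -- B's side
  have hidx : PySem.List.index? tokens "[SEP]" = some tw.length := pvIdx_eq tokens hpre
  have hrest : PySem.List.slice tokens (some ((tw.length : Int) + 1)) none = tl := by
    have hc : ((tw.length : Int) + 1) = ((tw.length + 1 : Nat) : Int) := by push_cast; ring
    rw [hc, PySem.List.slice_from_natCast, htok, ← List.singleton_append, ← List.append_assoc]
    exact List.drop_left' (by simp)
  have hmention : PySem.List.slice tokens none (some (tw.length : Int)) = tw := by
    rw [PySem.List.slice_to_natCast, htw, pvTake_takeWhile]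
  have htitle : ∀ s2 : Nat,
      (s2 = if "[SEP]" ∈ tl then (PySem.List.index? tl "[SEP]").getD tl.length else tl.length) →
      PySem.List.slice tl none (some (s2 : Int)) = tl.takeWhile pvKeep := by
    intro s2 hs2
    by_cases hmem : "[SEP]" ∈ tl
    · rw [hs2, if_pos hmem, pvIdx_eq tl hmem]
      simp [PySem.List.slice_to_natCast, pvTake_takeWhile]
    · have hall : tl.takeWhile pvKeep = tl := by
        apply List.takeWhile_eq_self_iff.mpr
        intro x hx
        simp only [pvKeep, Bool.not_eq_eq_eq_not, Bool.not_true, beq_eq_false_iff_ne, ne_eq]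
        exact fun hxe => hmem (hxe ▸ hx)
      rw [hs2, if_neg hmem, PySem.List.slice_to_natCast, hall, List.take_length]
  have hoverall : pvJ tokens =
      pvJ tw ++ pvStripB "[SEP]" ++ pvJ (tl.takeWhile pvKeep) ++ pvJ (tl.dropWhile pvKeep) := by
    conv_lhs => rw [htok]
    rw [pvJ_append, pvJ_cons]
    conv_lhs => rw [← List.takeWhile_append_dropWhile (p := pvKeep) (l := tl)]
    rw [pvJ_append, String.append_assoc, String.append_assoc]
  rw [hA]
  unfold parse_input_tokens_without_context_alt
  rw [hidx]
  simp only [pvJ] at hoverall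
  simp only [hrest, hmention, htitle _ rfl, pvJ, hoverall]
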